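-- pv_equiv track=rewrite | github.com/NameJaho/jieba_dict_builder | corpus_scanner1.py | find_max_length_word
-- ===== SOURCE A (Python) =====
-- def find_max_length_word(content, char_list, max_length=4):
--     results = []
--     occurrences = {}  # This dictionary will store the positions of each character to avoid duplicates
--
--     for char in char_list:
--         start_pos = 0
--         while start_pos < len(content):
--             found_pos = content.find(char, start_pos)
--             if found_pos == -1:
--                 break  # No more occurrences
--             if found_pos not in occurrences:
--                 # Calculate start and end indices for the substring
--                 start_idx = max(0, found_pos - max_length)
--                 end_idx = min(len(content), found_pos + max_length + 1)
--
--                 # Extract the substring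
--                 substring = content[start_idx:end_idx]
--
--                 # Calculate necessary padding
--                 left_padding = ' ' * (max_length - (found_pos - start_idx))
--                 right_padding = ' ' * ((found_pos + max_length + 1) - end_idx)
--
--                 # Apply padding and store the result
--                 padded_substring = left_padding + substring + right_padding
--                 results.append((char, padded_substring))
--                 occurrences[found_pos] = True
--
--             start_pos = found_pos + 1  # Move start_pos forward to find next occurrence
--
--     return results
-- ===== SOURCE B (Python) =====
-- def find_max_length_word(content, char_list, max_length=4):
--     n = len(content)
--     # one indexing pass: group positions by character
--     index = {}
--     for i, c in enumerate(content):
--         index.setdefault(c, []).append(i)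
--     results = []
--     seen = set()
--     for char in char_list:
--         candidates = index.get(char[0], []) if char else range(n)
--         for pos in candidates:
--             if pos not in seen and content.startswith(char, pos):
--                 start_idx = max(0, pos - max_length)
--                 end_idx = min(n, pos + max_length + 1)
--                 padded = (' ' * (max_length - (pos - start_idx))
--                           + content[start_idx:end_idx]
--                           + ' ' * ((pos + max_length + 1) - end_idx))
--                 results.append((char, padded))
--                 seen.add(pos)
--     return results
-- ===== Notes on version B (the rewrite author's own statement) =====
-- stated objective: alternative
-- what changed: Instead of re-scanning content with a cursor of repeated content.find calls for every entry of char_list, B makes one indexing pass over content grouping positions by character and then, per entry, only visits the positions of its first character (deduplicating with a set instead of a dict of booleans); intended as faster (measured ~1.6-1.8x on large inputs, below the confirmation bar, so not claimed).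
import Mathlib
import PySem

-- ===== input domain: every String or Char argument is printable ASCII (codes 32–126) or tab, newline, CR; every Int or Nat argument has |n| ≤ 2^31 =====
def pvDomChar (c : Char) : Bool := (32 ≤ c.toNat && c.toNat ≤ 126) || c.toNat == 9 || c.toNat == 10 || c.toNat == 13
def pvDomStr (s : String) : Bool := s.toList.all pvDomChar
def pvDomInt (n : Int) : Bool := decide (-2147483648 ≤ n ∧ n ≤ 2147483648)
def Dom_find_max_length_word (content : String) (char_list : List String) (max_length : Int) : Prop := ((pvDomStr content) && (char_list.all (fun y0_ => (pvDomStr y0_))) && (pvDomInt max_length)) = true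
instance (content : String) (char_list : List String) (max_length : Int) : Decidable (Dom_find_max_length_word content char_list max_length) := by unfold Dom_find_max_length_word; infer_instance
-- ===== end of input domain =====

-- B replaces A's per-character cursor loop of content.find calls by one indexing pass over
-- content (positions grouped by character) plus per-character candidate lookups (objective: alternative).

-- ===== PORT A =====
-- the padded-window expression, the identical lines in A and in B (shared helper)
def pvPad (content : String) (pos : Nat) (ml : Int) : String :=
  let start_idx : Int := max 0 ((pos : Int) - ml)
  let end_idx : Int := min ((content.toList.length : Int)) ((pos : Int) + ml + 1)
  let substring := PySem.Str.slice content (some start_idx) (some end_idx)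
  String.ofList (List.replicate (ml - ((pos : Int) - start_idx)).toNat ' ')
    ++ substring
    ++ String.ofList (List.replicate (((pos : Int) + ml + 1) - end_idx).toNat ' ')

-- A's "if found_pos not in occurrences: … append … occurrences[found_pos] = True" block
def pvStepA (content char : String) (ml : Int)
    (st : List (String × String) × PySem.Dict Nat Bool) (fp : Nat) :
    List (String × String) × PySem.Dict Nat Bool :=
  if st.2.contains fp then st
  else (st.1 ++ [(char, pvPad content fp ml)], st.2.insert fp true)

-- A's "while start_pos < len(content): found_pos = content.find(char, start_pos) …" loop;
-- the fuel (len(content)+1 at the call site) only makes the recursion total: start_pos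
-- strictly grows each turn and the loop stops once it reaches len(content)
def pvWhileA (content char : String) (ml : Int) :
    Nat → Nat → List (String × String) × PySem.Dict Nat Bool →
    List (String × String) × PySem.Dict Nat Bool
  | 0, _, st => st
  | fuel + 1, start_pos, st =>
    if start_pos < content.toList.length then
      let found := PySem.Chars.findFrom content.toList char.toList (start_pos : Int)
      if found = -1 then st
      else pvWhileA content char ml fuel (found.toNat + 1) (pvStepA content char ml st found.toNat)
    else st

def find_max_length_word (content : String) (char_list : List String) (max_length : Int) :
    List (String × String) :=
  (char_list.foldl
    (fun st char => pvWhileA content char max_length (content.toList.length + 1) 0 st)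
    ([], PySem.Dict.empty)).1

-- ===== PORT B =====
def find_max_length_word_alt (content : String) (char_list : List String) (max_length : Int) :
    List (String × String) :=
  let cs := content.toList
  -- one pass: index positions by character ("index.setdefault(c, []).append(i)")
  let index : PySem.Dict Char (List Nat) :=
    cs.zipIdx.foldl (fun d p => d.modify p.1 [] (fun l => l ++ [p.2])) PySem.Dict.empty
  (char_list.foldl
    (fun st char =>
      let candidates : List Nat :=
        match char.toList with
        | [] => List.range cs.length          -- "range(n)" when char is falsy
        | c :: _ => index.getD c []           -- "index.get(char[0], [])"
      candidates.foldl
        (fun (st : List (String × String) × PySem.Set Nat) pos =>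
          -- "if pos not in seen and content.startswith(char, pos)"
          -- (content.startswith(char, pos) for 0 ≤ pos ≤ len(content) is exactly:
          --  char.toList is a prefix of content.toList.drop pos)
          if !(PySem.Set.contains st.2 pos) && PySem.Chars.startswith (cs.drop pos) char.toList
          then (st.1 ++ [(char, pvPad content pos max_length)], PySem.Set.add st.2 pos)
          else st)
        st)
    (([], PySem.Set.empty) : List (String × String) × PySem.Set Nat)).1

-- ===== PRECONDITION & SPEC =====
def Spec_find_max_length_word (content : String) (char_list : List String) (max_length : Int) (out : List (String × String)) : Prop := out = find_max_length_word_alt content char_list max_length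
instance (content : String) (char_list : List String) (max_length : Int) (out : List (String × String)) : Decidable (Spec_find_max_length_word content char_list max_length out) := by unfold Spec_find_max_length_word; infer_instance

-- ===== CLAIM (what is proved, stated in full; the proofs are below) =====
def Claim_equal_find_max_length_word : Prop := ∀ (content : String) (char_list : List String) (max_length : Int), Dom_find_max_length_word content char_list max_length → Spec_find_max_length_word content char_list max_length (find_max_length_word content char_list max_length)

-- ===== LEMMAS AND PROOFS =====

-- the match positions of key in cs at or after s, in increasing order
def pvPosL (cs key : List Char) (s : Nat) : List Nat :=
  (List.range cs.length).filter (fun p => decide (s ≤ p) && PySem.Chars.startswith (cs.drop p) key)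

-- B's inner-loop step once the startswith test has been pushed into the candidate list
def pvStepB (content char : String) (ml : Int)
    (st : List (String × String) × PySem.Set Nat) (pos : Nat) :
    List (String × String) × PySem.Set Nat :=
  if !(PySem.Set.contains st.2 pos)
  then (st.1 ++ [(char, pvPad content pos ml)], PySem.Set.add st.2 pos)
  else st

lemma pv_eq_of_mem_iff_pairwise_lt (l1 l2 : List Nat)
    (h1 : l1.Pairwise (· < ·)) (h2 : l2.Pairwise (· < ·))
    (hm : ∀ x, x ∈ l1 ↔ x ∈ l2) : l1 = l2 := by
  have hperm := (List.perm_ext_iff_of_nodup h1.nodup h2.nodup).2 hm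
  exact PySem.List.eq_of_perm_of_pairwise_le_of_injective (fun x => x)
    (fun a b h => h) hperm (h1.imp le_of_lt) (h2.imp le_of_lt)

lemma pvPosL_eq_nil_of_le (cs key : List Char) (s : Nat) (h : cs.length ≤ s) :
    pvPosL cs key s = [] := by
  unfold pvPosL
  rw [List.filter_eq_nil_iff]
  intro p hp
  simp only [List.mem_range] at hp
  simp only [Bool.and_eq_true, decide_eq_true_eq, not_and]
  intro hsp; omega

lemma pvPosL_zero (cs key : List Char) :
    pvPosL cs key 0
      = (List.range cs.length).filter (fun p => PySem.Chars.startswith (cs.drop p) key) := by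
  unfold pvPosL; simp

-- A's find-stepping while loop visits exactly the match positions ≥ s, in order
lemma pv_whileA_eq (content char : String) (ml : Int) :
    ∀ (fuel s : Nat) (st : List (String × String) × PySem.Dict Nat Bool),
      content.toList.length < fuel + s →
      pvWhileA content char ml fuel s st =
        (pvPosL content.toList char.toList s).foldl (pvStepA content char ml) st := by
  intro fuel
  induction fuel with
  | zero =>
    intro s st hlt
    rw [pvPosL_eq_nil_of_le _ _ _ (by omega)]
    rfl
  | succ fuel ih =>
    intro s st hlt
    set cs := content.toList with hcs
    set key := char.toList with hkey
    by_cases hs : s < cs.length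
    · rw [pvWhileA]
      simp only [← hcs, ← hkey, if_pos hs]
      by_cases hr : PySem.Chars.findFrom cs key (s : Int) = -1
      · rw [if_pos hr]
        have hninf := (PySem.Chars.findFrom_natCast_eq_neg_one_iff cs key s (le_of_lt hs)).1 hr
        have : pvPosL cs key s = [] := by
          unfold pvPosL
          rw [List.filter_eq_nil_iff]
          intro p hp
          simp only [Bool.and_eq_true, decide_eq_true_eq, not_and]
          intro hsp hsw
          exfalso
          apply hninf
          rw [← PySem.Chars.isIn_iff_infix, ← PySem.Chars.exists_prefix_drop_iff_isIn]
          refine ⟨p - s, ?_⟩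
          rw [List.drop_drop]
          have : s + (p - s) = p := by omega
          rw [this]
          exact (PySem.Chars.startswith_iff _ _).1 hsw
        rw [this]; rfl
      · rw [if_neg hr]
        obtain ⟨hle, hpre, hmin⟩ :=
          PySem.Chars.findFrom_natCast_spec cs key s (le_of_lt hs) hr
        set fp := (PySem.Chars.findFrom cs key (s : Int)).toNat with hfp
        have hsfp : s ≤ fp := by omega
        have hfpn : fp < cs.length := by
          cases hk : key with
          | nil =>
            have hfps : fp ≤ s := by
              by_contra hgt
              exact hmin s (le_refl s) (by omega) (by rw [hk]; exact List.nil_prefix)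
            omega
          | cons c rest =>
            rw [hk] at hpre
            rcases hpre with ⟨t, ht⟩
            have : cs.drop fp ≠ [] := by rw [← ht]; simp
            rw [ne_eq, List.drop_eq_nil_iff] at this
            omega
        have hdecomp : pvPosL cs key s = fp :: pvPosL cs key (fp + 1) := by
          apply pv_eq_of_mem_iff_pairwise_lt
          · exact List.pairwise_lt_range.filter _
          · rw [List.pairwise_cons]
            refine ⟨?_, List.pairwise_lt_range.filter _⟩
            intro x hx
            unfold pvPosL at hx
            rcases List.mem_filter.1 hx with ⟨_, hcond⟩
            simp only [Bool.and_eq_true, decide_eq_true_eq] at hcond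
            omega
          · intro x
            unfold pvPosL
            simp only [List.mem_cons, List.mem_filter, List.mem_range,
              Bool.and_eq_true, decide_eq_true_eq]
            constructor
            · rintro ⟨hxn, hsx, hsw⟩
              rcases Nat.lt_trichotomy x fp with hlt' | heq | hgt
              · exact absurd ((PySem.Chars.startswith_iff _ _).1 hsw) (hmin x hsx hlt')
              · exact Or.inl heq
              · exact Or.inr ⟨hxn, by omega, hsw⟩
            · rintro (rfl | ⟨hxn, hx1, hsw⟩)
              · exact ⟨hfpn, hsfp, (PySem.Chars.startswith_iff _ _).2 hpre⟩
              · exact ⟨hxn, by omega, hsw⟩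
        rw [hdecomp, List.foldl_cons]
        exact ih (fp + 1) (pvStepA content char ml st fp) (by omega)
    · rw [pvWhileA]
      simp only [← hcs, if_neg hs]
      rw [pvPosL_eq_nil_of_le _ _ _ (by omega)]
      rfl

-- B's index lists for each character the positions where it occurs, in order
lemma pv_index_getD (cs : List Char) (c : Char) :
    (cs.zipIdx.foldl (fun (d : PySem.Dict Char (List Nat)) (p : Char × Nat) => d.modify p.1 [] (fun l => l ++ [p.2]))
                   PySem.Dict.empty).getD c []
      = (List.range cs.length).filter (fun p => cs[p]? == some c) := by
  rw [PySem.Dict.getD_foldl_modify_append]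
  simp only [PySem.Dict.getD_empty, List.nil_append]
  apply pv_eq_of_mem_iff_pairwise_lt
  · have hsub : ((cs.zipIdx.filter (fun p => p.1 == c)).map (fun x => x.2)).Sublist
        (cs.zipIdx.map Prod.snd) := List.Sublist.map _ List.filter_sublist
    rw [List.zipIdx_map_snd] at hsub
    exact List.Pairwise.sublist hsub (by rw [← List.range_eq_range']; exact List.pairwise_lt_range)
  · exact List.pairwise_lt_range.filter _
  · intro x
    simp only [List.mem_map, List.mem_filter, List.mem_range, beq_iff_eq]
    constructor
    · rintro ⟨⟨a, i⟩, ⟨hmem, hac⟩, rfl⟩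
      simp only at hac; subst hac
      have hg := List.mem_zipIdx_iff_getElem?.1 hmem
      simp only at hg
      have hx : i < cs.length := by
        rcases List.getElem?_eq_some_iff.1 hg with ⟨h, _⟩; exact h
      exact ⟨hx, hg⟩
    · rintro ⟨hx, hget⟩
      exact ⟨(c, x), ⟨List.mem_zipIdx_iff_getElem?.2 hget, rfl⟩, rfl⟩

-- pushing a state-independent conjunct of the loop guard into the candidate list
lemma pv_foldl_guard_filter {σ : Type} (l : List Nat) (q : Nat → Bool)
    (f : σ → Nat → σ) (g : σ → Nat → Bool) (st : σ) :
    l.foldl (fun st p => if g st p && q p then f st p else st) st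
      = (l.filter q).foldl (fun st p => if g st p then f st p else st) st := by
  induction l generalizing st with
  | nil => rfl
  | cons a t ih =>
    rw [List.foldl_cons, List.filter_cons]
    cases hq : q a
    · simp only [Bool.and_false, Bool.false_eq_true, if_false]
      exact ih st
    · simp only [Bool.and_true, if_true, List.foldl_cons]
      exact ih _

-- filtering the first-character candidates by startswith gives all match positions
lemma pv_candidates_filter (cs : List Char) (c : Char) (rest : List Char) :
    ((List.range cs.length).filter (fun p => cs[p]? == some c)).filter
        (fun p => PySem.Chars.startswith (cs.drop p) (c :: rest))
      = pvPosL cs (c :: rest) 0 := by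
  rw [List.filter_filter, pvPosL_zero]
  apply List.filter_congr
  intro p hp
  cases hsw : PySem.Chars.startswith (cs.drop p) (c :: rest)
  · simp
  · simp only [Bool.true_and]
    rcases (PySem.Chars.startswith_iff _ _).1 hsw with ⟨t, ht⟩
    have : cs[p]? = some c := by rw [← List.head?_drop, ← ht]; rfl
    simp [this]

-- dict-of-Booleans membership (A) and set membership (B) stay in lockstep
lemma pv_couple (content char : String) (ml : Int) :
    ∀ (l : List Nat) (stA : List (String × String) × PySem.Dict Nat Bool)
      (stB : List (String × String) × PySem.Set Nat),
      stA.1 = stB.1 → (∀ p, stA.2.contains p = PySem.Set.contains stB.2 p) →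
      (l.foldl (pvStepA content char ml) stA).1 = (l.foldl (pvStepB content char ml) stB).1 ∧
      (∀ p, (l.foldl (pvStepA content char ml) stA).2.contains p
            = PySem.Set.contains (l.foldl (pvStepB content char ml) stB).2 p) := by
  intro l
  induction l with
  | nil => intro stA stB h1 h2; exact ⟨h1, h2⟩
  | cons a t ih =>
    intro stA stB h1 h2
    rw [List.foldl_cons, List.foldl_cons]
    apply ih
    · unfold pvStepA pvStepB
      rw [h2 a]
      cases hc : PySem.Set.contains stB.2 a
      · simp [h1]
      · simp [h1]
    · intro p
      unfold pvStepA pvStepB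
      rw [h2 a]
      cases hc : PySem.Set.contains stB.2 a
      · simp only [Bool.not_false, if_true, Bool.false_eq_true, if_false]
        rw [PySem.Dict.contains_insert]
        rw [Bool.eq_iff_iff]
        simp only [Bool.or_eq_true, beq_iff_eq, PySem.Set.contains_iff, PySem.Set.mem_add]
        rw [← PySem.Set.contains_iff, ← h2 p]
        tauto
      · simp [h2 p]

-- the outer loop over char_list, with the per-character reductions of both sides
lemma pv_outer (content : String) (ml : Int) :
    ∀ (char_list : List String) (stA : List (String × String) × PySem.Dict Nat Bool)
      (stB : List (String × String) × PySem.Set Nat),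
      stA.1 = stB.1 → (∀ p, stA.2.contains p = PySem.Set.contains stB.2 p) →
      ((char_list.foldl
          (fun st char => pvWhileA content char ml (content.toList.length + 1) 0 st) stA).1
        = (char_list.foldl
            (fun st char =>
              (match char.toList with
               | [] => List.range content.toList.length
               | c :: _ => (content.toList.zipIdx.foldl
                   (fun (d : PySem.Dict Char (List Nat)) (p : Char × Nat) => d.modify p.1 [] (fun l => l ++ [p.2]))
                   PySem.Dict.empty).getD c []).foldl
                (fun (st : List (String × String) × PySem.Set Nat) pos =>
                  if !(PySem.Set.contains st.2 pos)
                      && PySem.Chars.startswith (content.toList.drop pos) char.toList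
                  then (st.1 ++ [(char, pvPad content pos ml)], PySem.Set.add st.2 pos)
                  else st)
                st) stB).1)
      ∧ (∀ p, (char_list.foldl
            (fun st char => pvWhileA content char ml (content.toList.length + 1) 0 st) stA).2.contains p
          = PySem.Set.contains (char_list.foldl
              (fun st char =>
                (match char.toList with
                 | [] => List.range content.toList.length
                 | c :: _ => (content.toList.zipIdx.foldl
                     (fun (d : PySem.Dict Char (List Nat)) (p : Char × Nat) => d.modify p.1 [] (fun l => l ++ [p.2]))
                   PySem.Dict.empty).getD c []).foldl
                  (fun (st : List (String × String) × PySem.Set Nat) pos =>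
                    if !(PySem.Set.contains st.2 pos)
                        && PySem.Chars.startswith (content.toList.drop pos) char.toList
                    then (st.1 ++ [(char, pvPad content pos ml)], PySem.Set.add st.2 pos)
                    else st)
                  st) stB).2 p) := by
  intro char_list
  induction char_list with
  | nil => intro stA stB h1 h2; exact ⟨h1, h2⟩
  | cons char t ih =>
    intro stA stB h1 h2
    rw [List.foldl_cons, List.foldl_cons]
    have hA : pvWhileA content char ml (content.toList.length + 1) 0 stA
        = (pvPosL content.toList char.toList 0).foldl (pvStepA content char ml) stA :=
      pv_whileA_eq content char ml _ 0 stA (by omega)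
    have hguard := pv_foldl_guard_filter
      (l := (match char.toList with
             | [] => List.range content.toList.length
             | c :: _ => (content.toList.zipIdx.foldl
                 (fun (d : PySem.Dict Char (List Nat)) (p : Char × Nat) => d.modify p.1 [] (fun l => l ++ [p.2]))
                   PySem.Dict.empty).getD c []))
      (q := fun pos => PySem.Chars.startswith (content.toList.drop pos) char.toList)
      (f := fun st pos => (st.1 ++ [(char, pvPad content pos ml)], PySem.Set.add st.2 pos))
      (g := fun (st : List (String × String) × PySem.Set Nat) pos =>
              !(PySem.Set.contains st.2 pos))
      stB
    have hcand : (match char.toList with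
             | [] => List.range content.toList.length
             | c :: _ => (content.toList.zipIdx.foldl
                 (fun (d : PySem.Dict Char (List Nat)) (p : Char × Nat) => d.modify p.1 [] (fun l => l ++ [p.2]))
                   PySem.Dict.empty).getD c []).filter
            (fun pos => PySem.Chars.startswith (content.toList.drop pos) char.toList)
          = pvPosL content.toList char.toList 0 := by
      cases hk : char.toList with
      | nil => exact (pvPosL_zero content.toList []).symm
      | cons c rest =>
        show ((content.toList.zipIdx.foldl
            (fun (d : PySem.Dict Char (List Nat)) (p : Char × Nat) =>
              d.modify p.1 [] (fun l => l ++ [p.2]))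
            PySem.Dict.empty).getD c []).filter
            (fun pos => PySem.Chars.startswith (content.toList.drop pos) (c :: rest))
          = pvPosL content.toList (c :: rest) 0
        rw [pv_index_getD, pv_candidates_filter]
    rw [hA, hguard, hcand]
    exact ih _ _ (pv_couple content char ml _ stA stB h1 h2).1
      (pv_couple content char ml _ stA stB h1 h2).2

-- ===== VERDICT (by name: the statement is the Claim_ definition above) =====
theorem find_max_length_word_spec : Claim_equal_find_max_length_word := by
  intro content char_list max_length _hdom
  unfold Spec_find_max_length_word find_max_length_word find_max_length_word_alt
  exact (pv_outer content max_length char_list ([], PySem.Dict.empty) ([], PySem.Set.empty)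
    rfl (fun p => rfl)).1
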